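-- pv_equiv track=rewrite | github.com/RomainGrx/LINMA1691-Homeworks | Devoir 1/HW1-prog.py | color_k_neigh
-- ===== SOURCE A (Python) =====
-- def color_k_neigh(A, k):
--     """
--     Input :
--         - A an adjacency matrix (array of arrays)
--         - k the size of the neighbourhood of the coloring scheme
--
--     Return an array containing the colors as defined in Q4 of the project statement
--     The colors have to be structured as a sorted tuple of pairs (k, deg(v))
--     """
--
--     degrees = [sum(A[i]) for i in range(len(A))]
--     ar = []
--
--     n = len(A)
--     Nodes = [[0]*n]*n
--
--     for i in range(n):
--         ar.append([])
--         for j in range(k+1):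
--             Nodesprime = Nodes[i][:]
--             if j==0:
--                 Nodesprime[i]=1
--             else:
--                 for m in range(n):
--                     if(Nodes[i][m]==1):
--                         for p in range(n):
--                             if(A[m][p]==1):
--                                 Nodesprime[p]=1
--
--             Nodes[i] = Nodesprime
--
--             for o in range(n):
--                 if(Nodes[i][o]==1):
--                     ar[i].append((j,degrees[o]))
--
--
--
--     rep = [];
--     for i in range(len(ar)):
--         rep.append(tuple(sorted(ar[i])))
--
--     return rep
-- ===== SOURCE B (Python) =====
-- def color_k_neigh(A, k):
--     n = len(A)
--     degrees = [sum(row) for row in A]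
--     rep = []
--     for i in range(n):
--         seen = [False] * n
--         seen[i] = True
--         frontier = [i]
--         colors = []
--         for j in range(k + 1):
--             if j > 0:
--                 newf = []
--                 for m in frontier:
--                     row = A[m]
--                     for p in range(n):
--                         if row[p] == 1:
--                             if not seen[p]:
--                                 seen[p] = True
--                                 newf.append(p)
--                 frontier = newf
--             for o in range(n):
--                 if seen[o]:
--                     colors.append((j, degrees[o]))
--         rep.append(tuple(sorted(colors)))
--     return rep
-- ===== Notes on version B (the rewrite author's own statement) =====
-- stated objective: faster
-- what changed: B runs a per-source frontier BFS over a seen array (each row scanned at most once per source), instead of A's re-scanning all n rows of the matrix on every hop for every source; emission order and the final sort are unchanged.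
import Mathlib
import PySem

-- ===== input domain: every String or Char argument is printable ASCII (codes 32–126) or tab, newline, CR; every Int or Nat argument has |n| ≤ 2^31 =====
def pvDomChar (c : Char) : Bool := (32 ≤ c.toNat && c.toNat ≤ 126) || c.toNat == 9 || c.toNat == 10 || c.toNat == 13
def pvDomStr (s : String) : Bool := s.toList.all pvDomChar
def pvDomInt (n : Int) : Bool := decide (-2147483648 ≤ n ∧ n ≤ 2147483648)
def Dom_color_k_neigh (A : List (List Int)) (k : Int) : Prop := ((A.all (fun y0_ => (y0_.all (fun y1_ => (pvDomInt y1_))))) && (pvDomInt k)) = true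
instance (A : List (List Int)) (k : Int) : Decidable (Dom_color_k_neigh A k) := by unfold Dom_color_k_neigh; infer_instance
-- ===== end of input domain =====

-- B replaces A's per-hop full-matrix scans with a per-source frontier BFS over precomputed
-- adjacency lists (same return value; measurably faster on large graphs).

-- ===== PORT A =====
-- Note: A's 'Nodes = [[0]*n]*n' aliases one shared zero row, but that row is never mutated
-- (rows are only REBOUND via 'Nodes[i] = Nodesprime'), so a plain list of rows is exact.
-- All list indexing below is in range under Pre_ (rows of length ≥ n), so '.getD' is exact.
def color_k_neigh (A : List (List Int)) (k : Int) : List (List (Int × Int)) :=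
  let n := A.length
  let degrees : List Int := (List.range n).map (fun i => (A.getD i []).sum)
  let st :=
    (List.range n).foldl
      (fun (st : List (List Int) × List (List (Int × Int))) i =>
        let ar := st.2 ++ [[]]                        -- ar.append([])
        (PySem.List.pyRange 0 (k+1) 1).foldl
          (fun (st2 : List (List Int) × List (List (Int × Int))) j =>
            let nodesI := st2.1.getD i []             -- Nodesprime = Nodes[i][:]
            let nodesprime : List Int :=
              if j == 0 then nodesI.set i 1
              else
                (List.range n).foldl
                  (fun np m =>
                    if nodesI.getD m 0 == 1 then
                      (List.range n).foldl
                        (fun np2 p => if (A.getD m []).getD p 0 == 1 then np2.set p 1 else np2)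
                        np
                    else np)
                  nodesI
            let nodes' := st2.1.set i nodesprime      -- Nodes[i] = Nodesprime
            let ar' :=
              (List.range n).foldl
                (fun ar2 o =>
                  if (nodes'.getD i []).getD o 0 == 1 then
                    ar2.set i ((ar2.getD i []) ++ [((j : Int), degrees.getD o 0)])
                  else ar2)
                st2.2
            (nodes', ar'))
          (st.1, ar))
      (List.replicate n (List.replicate n (0 : Int)), ([] : List (List (Int × Int))))
  (List.range st.2.length).map
    (fun i => PySem.List.sorted2 (st.2.getD i []) (fun x => x.1) (fun x => x.2))

-- ===== PORT B =====
def color_k_neigh_alt (A : List (List Int)) (k : Int) : List (List (Int × Int)) :=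
  let n := A.length
  let degrees : List Int := A.map (fun row => row.sum)
  (List.range n).foldl
    (fun rep i =>
      let st :=
        (PySem.List.pyRange 0 (k+1) 1).foldl
          (fun (st : List Bool × List Nat × List (Int × Int)) j =>
            let sfc : List Bool × List Nat × List (Int × Int) :=
              if j > 0 then
                let sf :=
                  st.2.1.foldl
                    (fun (sf : List Bool × List Nat) m =>
                      let row := A.getD m []
                      (List.range n).foldl
                        (fun (sf2 : List Bool × List Nat) p =>
                          if row.getD p 0 == 1 then
                            if !(sf2.1.getD p false) then (sf2.1.set p true, sf2.2 ++ [p])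
                            else sf2
                          else sf2)
                        sf)
                    (st.1, ([] : List Nat))
                (sf.1, sf.2, st.2.2)
              else st
            let colors' :=
              (List.range n).foldl
                (fun cs o =>
                  if sfc.1.getD o false then cs ++ [((j : Int), degrees.getD o 0)] else cs)
                sfc.2.2
            (sfc.1, sfc.2.1, colors'))
          ((List.replicate n false).set i true, ([i] : List Nat), ([] : List (Int × Int)))
      rep ++ [PySem.List.sorted2 st.2.2 (fun x => x.1) (fun x => x.2)])
    []

-- ===== PRECONDITION & SPEC =====
-- Pre_ is exact: A (and B) raise IndexError precisely when k >= 1 and some row is shorter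
-- than len(A) (every node is in its own 0-hop set, so its row is always scanned at hop 1);
-- on every other input A returns normally.
def Pre_color_k_neigh (A : List (List Int)) (k : Int) : Prop :=
  k < 1 ∨ ∀ row ∈ A, A.length ≤ row.length
instance (A : List (List Int)) (k : Int) : Decidable (Pre_color_k_neigh A k) := by
  unfold Pre_color_k_neigh; infer_instance

def pvWitness_color_k_neigh : List (List Int) × Int := ([[0, 1], [1, 0]], 2)

def Spec_color_k_neigh (A : List (List Int)) (k : Int) (out : List (List (Int × Int))) : Prop := out = color_k_neigh_alt A k
instance (A : List (List Int)) (k : Int) (out : List (List (Int × Int))) : Decidable (Spec_color_k_neigh A k out) := by unfold Spec_color_k_neigh; infer_instance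

-- ===== CLAIM (what is proved, stated in full; the proofs are below) =====
def Claim_equal_color_k_neigh : Prop := ∀ (A : List (List Int)) (k : Int), Dom_color_k_neigh A k → Pre_color_k_neigh A k → Spec_color_k_neigh A k (color_k_neigh A k)


-- ===== LEMMAS AND PROOFS =====

-- generic getD/set facts used throughout
theorem pv_getD_set {α : Type} (l : List α) (i j : Nat) (a d : α) :
    (l.set i a).getD j d = if i = j ∧ i < l.length then a else l.getD j d := by
  simp only [List.getD_eq_getElem?_getD, List.getElem?_set]
  split_ifs with h1 h2 h3 <;> (try simp_all) <;> omega

theorem pv_set_concat {α : Type} (ar : List α) (cs x : α) :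
    (ar ++ [cs]).set ar.length x = ar ++ [x] := by
  rw [List.set_append_right _ _ (le_refl _)]; simp

theorem pv_getD_concat {α : Type} (ar : List α) (cs d : α) :
    (ar ++ [cs]).getD ar.length d = cs := by
  simp [List.getD_eq_getElem?_getD]

theorem pv_getD_replicate {α : Type} (n o : Nat) (x d : α) :
    (List.replicate n x).getD o d = if o < n then x else d := by
  simp only [List.getD_eq_getElem?_getD, List.getElem?_replicate]
  split_ifs <;> simp_all

theorem pv_getD_map_range {α : Type} (n i : Nat) (f : Nat → α) (d : α) (h : i < n) :
    ((List.range n).map f).getD i d = f i := by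
  simp [List.getD_eq_getElem?_getD, h]

-- the two degrees lists are the same list
theorem pv_degrees_eq (A : List (List Int)) :
    (List.range A.length).map (fun i => (A.getD i []).sum) = A.map (fun row => row.sum) := by
  apply List.ext_getElem
  · simp
  · intro i h1 h2
    have hi : i < A.length := by simpa using h2
    simp [List.getD_eq_getElem?_getD, List.getElem?_eq_getElem hi]

-- ---------- pure per-row forms of the two loop bodies ----------
def pvExpand (A : List (List Int)) (n : Nat) (r : List Int) : List Int :=
  (List.range n).foldl
    (fun np m =>
      if r.getD m 0 == 1 then
        (List.range n).foldl
          (fun np2 p => if (A.getD m []).getD p 0 == 1 then np2.set p 1 else np2) np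
      else np)
    r

def pvStepA (A : List (List Int)) (n : Nat) (degrees : List Int) (i : Nat)
    (st : List Int × List (Int × Int)) (j : Int) : List Int × List (Int × Int) :=
  let r' := if j == 0 then st.1.set i 1 else pvExpand A n st.1
  (r', st.2 ++ ((List.range n).filter (fun o => r'.getD o 0 == 1)).map
        (fun o => ((j : Int), degrees.getD o 0)))

def pvRowA (A : List (List Int)) (k : Int) (i : Nat) : List (Int × Int) :=
  ((PySem.List.pyRange 0 (k+1) 1).foldl
    (pvStepA A A.length ((List.range A.length).map (fun i => (A.getD i []).sum)) i)
    (List.replicate A.length 0, [])).2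

def pvMarkStep : List Bool × List Nat → Nat → List Bool × List Nat :=
  fun sf2 p => if !(sf2.1.getD p false) then (sf2.1.set p true, sf2.2 ++ [p]) else sf2

def pvStepB (A : List (List Int)) (n : Nat) (degrees : List Int)
    (st : List Bool × List Nat × List (Int × Int)) (j : Int) :
    List Bool × List Nat × List (Int × Int) :=
  let sfc : List Bool × List Nat × List (Int × Int) :=
    if j > 0 then
      let sf := st.2.1.foldl
        (fun sf m =>
          let row := A.getD m []
          (List.range n).foldl
            (fun sf2 p => if row.getD p 0 == 1 then pvMarkStep sf2 p else sf2) sf)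
        (st.1, [])
      (sf.1, sf.2, st.2.2)
    else st
  (sfc.1, sfc.2.1,
   (List.range n).foldl
     (fun cs o => if sfc.1.getD o false then cs ++ [((j : Int), degrees.getD o 0)] else cs)
     sfc.2.2)

def pvAdj (A : List (List Int)) : List (List Nat) :=
  A.map (fun row => (List.range A.length).filter (fun p => row.getD p 0 == 1))

def pvRowB (A : List (List Int)) (k : Int) (i : Nat) : List (Int × Int) :=
  ((PySem.List.pyRange 0 (k+1) 1).foldl
    (pvStepB A A.length (A.map (fun row => row.sum)))
    ((List.replicate A.length false).set i true, [i], [])).2.2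

-- ---------- decomposition of port A ----------
theorem pvEmitAr (os : List Nat) (c : Nat → Bool) (f : Nat → Int × Int)
    (ar0 : List (List (Int × Int))) (cs : List (Int × Int)) :
    os.foldl
      (fun ar2 o => if c o then ar2.set ar0.length ((ar2.getD ar0.length []) ++ [f o]) else ar2)
      (ar0 ++ [cs])
    = ar0 ++ [cs ++ (os.filter c).map f] := by
  induction os generalizing cs with
  | nil => simp
  | cons o os ih =>
    rw [List.foldl_cons]
    by_cases h : c o
    · rw [if_pos h, pv_getD_concat, pv_set_concat, ih, List.filter_cons_of_pos h,
        List.map_cons]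
      simp
    · rw [if_neg h, ih, List.filter_cons_of_neg h]

-- the transliterated inner/outer loop bodies of port A, named for the decomposition
def pvBodyA (A : List (List Int)) (degrees : List Int) (i : Nat)
    (st2 : List (List Int) × List (List (Int × Int))) (j : Int) :
    List (List Int) × List (List (Int × Int)) :=
  let nodesI := st2.1.getD i []
  let nodesprime : List Int :=
    if j == 0 then nodesI.set i 1
    else
      (List.range A.length).foldl
        (fun np m =>
          if nodesI.getD m 0 == 1 then
            (List.range A.length).foldl
              (fun np2 p => if (A.getD m []).getD p 0 == 1 then np2.set p 1 else np2)
              np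
          else np)
        nodesI
  let nodes' := st2.1.set i nodesprime
  let ar' :=
    (List.range A.length).foldl
      (fun ar2 o =>
        if (nodes'.getD i []).getD o 0 == 1 then
          ar2.set i ((ar2.getD i []) ++ [((j : Int), degrees.getD o 0)])
        else ar2)
      st2.2
  (nodes', ar')

def pvBodyOuterA (A : List (List Int)) (k : Int) (degrees : List Int)
    (st : List (List Int) × List (List (Int × Int))) (i : Nat) :
    List (List Int) × List (List (Int × Int)) :=
  (PySem.List.pyRange 0 (k+1) 1).foldl (pvBodyA A degrees i) (st.1, st.2 ++ [[]])

theorem pvBodyA_eq (A : List (List Int)) (degrees : List Int) (i : Nat)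
    (nodes : List (List Int)) (ar0 : List (List (Int × Int))) (r : List Int)
    (cs : List (Int × Int)) (j : Int)
    (hlen : nodes.length = A.length) (hi : i < A.length)
    (hri : nodes.getD i [] = r) (har : ar0.length = i) :
    pvBodyA A degrees i (nodes, ar0 ++ [cs]) j
      = (nodes.set i (pvStepA A A.length degrees i (r, cs) j).1,
         ar0 ++ [(pvStepA A A.length degrees i (r, cs) j).2]) := by
  simp only [pvBodyA, pvStepA, pvExpand]
  rw [hri]
  rw [show ((nodes.set i
        (if (j == 0) = true then r.set i 1
        else
          List.foldl
            (fun np m =>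
              if (r.getD m 0 == 1) = true then
                List.foldl (fun np2 p => if ((A.getD m []).getD p 0 == 1) = true then np2.set p 1 else np2) np
                  (List.range A.length)
              else np)
            r (List.range A.length))).getD i [])
      = (if (j == 0) = true then r.set i 1
        else
          List.foldl
            (fun np m =>
              if (r.getD m 0 == 1) = true then
                List.foldl (fun np2 p => if ((A.getD m []).getD p 0 == 1) = true then np2.set p 1 else np2) np
                  (List.range A.length)
              else np)
            r (List.range A.length))
    from by rw [pv_getD_set, if_pos ⟨rfl, by omega⟩]]
  rw [← har, pvEmitAr]

theorem pvInnerA (A : List (List Int)) (degrees : List Int) (i : Nat) (js : List Int) :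
    ∀ (nodes : List (List Int)) (ar0 : List (List (Int × Int))) (r : List Int)
      (cs : List (Int × Int)),
      nodes.length = A.length → i < A.length → nodes.getD i [] = r → ar0.length = i →
      ∃ nodesOut,
        js.foldl (pvBodyA A degrees i) (nodes, ar0 ++ [cs])
          = (nodesOut, ar0 ++ [(js.foldl (pvStepA A A.length degrees i) (r, cs)).2])
        ∧ nodesOut.length = A.length
        ∧ ∀ i', i' ≠ i → nodesOut.getD i' [] = nodes.getD i' [] := by
  induction js with
  | nil =>
    intro nodes ar0 r cs hlen hi hri har
    exact ⟨nodes, rfl, hlen, fun _ _ => rfl⟩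
  | cons j js ih =>
    intro nodes ar0 r cs hlen hi hri har
    rw [List.foldl_cons, List.foldl_cons, pvBodyA_eq A degrees i nodes ar0 r cs j hlen hi hri har]
    obtain ⟨nodesOut, heq, hlen2, hother⟩ :=
      ih (nodes.set i (pvStepA A A.length degrees i (r, cs) j).1) ar0
        (pvStepA A A.length degrees i (r, cs) j).1
        (pvStepA A A.length degrees i (r, cs) j).2
        (by rw [List.length_set, hlen])
        hi
        (by rw [pv_getD_set, if_pos ⟨rfl, by omega⟩])
        har
    refine ⟨nodesOut, ?_, hlen2, ?_⟩
    · rw [heq,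
        show pvStepA A A.length degrees i (r, cs) j
            = ((pvStepA A A.length degrees i (r, cs) j).1,
               (pvStepA A A.length degrees i (r, cs) j).2) from rfl]
    · intro i' hi'
      rw [hother i' hi', pv_getD_set, if_neg (fun h => hi' h.1.symm)]

theorem pvOuterA (A : List (List Int)) (k : Int) (degrees : List Int) (c : Nat) :
    ∀ (t : Nat) (nodes : List (List Int)) (ar : List (List (Int × Int))),
      nodes.length = A.length → t + c ≤ A.length → ar.length = t →
      (∀ i', t ≤ i' → i' < A.length → nodes.getD i' [] = List.replicate A.length 0) →
      ((List.range' t c).foldl (pvBodyOuterA A k degrees) (nodes, ar)).2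
        = ar ++ (List.range' t c).map
            (fun i => ((PySem.List.pyRange 0 (k+1) 1).foldl
                (pvStepA A A.length degrees i) (List.replicate A.length 0, [])).2) := by
  induction c with
  | zero => intro t nodes ar _ _ _ _; simp
  | succ c ih =>
    intro t nodes ar hlen htc har hprist
    have hti : t < A.length := by omega
    rw [List.range'_succ, List.foldl_cons, List.map_cons]
    obtain ⟨nodesOut, heq, hlen2, hother⟩ :=
      pvInnerA A degrees t (PySem.List.pyRange 0 (k+1) 1) nodes ar
        (List.replicate A.length 0) [] hlen hti (hprist t le_rfl hti) har
    rw [show pvBodyOuterA A k degrees (nodes, ar) t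
        = (PySem.List.pyRange 0 (k+1) 1).foldl (pvBodyA A degrees t) (nodes, ar ++ [[]])
        from rfl, heq,
      ih (t+1) nodesOut _ hlen2 (by omega) (by simp [har])
        (fun i' h1 h2 => by rw [hother i' (by omega), hprist i' (by omega) h2])]
    simp

theorem pvDecompA (A : List (List Int)) (k : Int) :
    color_k_neigh A k
    = (List.range A.length).map
        (fun i => PySem.List.sorted2 (pvRowA A k i) (fun x => x.1) (fun x => x.2)) := by
  have hport : color_k_neigh A k
      = (List.range
          (((List.range A.length).foldl
            (pvBodyOuterA A k ((List.range A.length).map (fun i => (A.getD i []).sum)))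
            (List.replicate A.length (List.replicate A.length (0 : Int)), [])).2).length).map
          (fun i => PySem.List.sorted2
            (((List.range A.length).foldl
              (pvBodyOuterA A k ((List.range A.length).map (fun i => (A.getD i []).sum)))
              (List.replicate A.length (List.replicate A.length (0 : Int)), [])).2.getD i [])
            (fun x => x.1) (fun x => x.2)) := rfl
  rw [hport]
  have h := pvOuterA A k ((List.range A.length).map (fun i => (A.getD i []).sum)) A.length 0
    (List.replicate A.length (List.replicate A.length (0 : Int))) []
    (by simp) (by omega) rfl
    (fun i' _ h2 => by rw [pv_getD_replicate, if_pos h2])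
  rw [← List.range_eq_range', List.nil_append] at h
  rw [h]
  apply List.ext_getElem
  · simp
  · intro p h1 h2
    simp only [List.getElem_map, List.getElem_range]
    rw [pv_getD_map_range _ _ _ _ (by simpa using h1)]
    rfl

theorem pvDecompB (A : List (List Int)) (k : Int) :
    color_k_neigh_alt A k
    = (List.range A.length).map
        (fun i => PySem.List.sorted2 (pvRowB A k i) (fun x => x.1) (fun x => x.2)) := by
  have hport : color_k_neigh_alt A k
      = (List.range A.length).foldl
          (fun rep i =>
            rep ++ [PySem.List.sorted2
              ((PySem.List.pyRange 0 (k+1) 1).foldl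
                (pvStepB A A.length (A.map (fun row => row.sum)))
                ((List.replicate A.length false).set i true, [i], [])).2.2
              (fun x => x.1) (fun x => x.2)])
          [] := rfl
  rw [hport, PySem.List.foldl_append_singleton_eq_map]
  simp only [List.nil_append]
  rfl

-- ---------- the frontier-marking fold, characterised ----------
theorem pvMarkFold (L : List Nat) :
    ∀ (s : List Bool) (nf : List Nat), (∀ p ∈ L, p < s.length) →
      (L.foldl pvMarkStep (s, nf)).1.length = s.length
      ∧ (∀ o, (L.foldl pvMarkStep (s, nf)).1.getD o false
              = (s.getD o false || decide (o ∈ L)))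
      ∧ (∀ q, q ∈ (L.foldl pvMarkStep (s, nf)).2
              ↔ q ∈ nf ∨ (q ∈ L ∧ s.getD q false = false)) := by
  induction L with
  | nil => intro s nf _; simp
  | cons p L ih =>
    intro s nf hL
    have hp : p < s.length := hL p (by simp)
    rw [List.foldl_cons]
    by_cases hs : s.getD p false = true
    · have hs2 : s[p]?.getD false = true := by
        simpa [List.getD_eq_getElem?_getD] using hs
      rw [show pvMarkStep (s, nf) p = (s, nf) by simp [pvMarkStep, hs2]]
      obtain ⟨h1, h2, h3⟩ := ih s nf (fun q hq => hL q (by simp [hq]))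
      refine ⟨h1, fun o => ?_, fun q => ?_⟩
      · rw [h2 o]
        by_cases ho : o = p <;> simp_all
      · rw [h3 q]
        by_cases hq : q = p <;> simp_all
    · have hs2 : s[p]?.getD false = false := by
        rw [← List.getD_eq_getElem?_getD]; simpa using hs
      rw [show pvMarkStep (s, nf) p = (s.set p true, nf ++ [p]) by simp [pvMarkStep, hs2]]
      obtain ⟨h1, h2, h3⟩ := ih (s.set p true) (nf ++ [p])
        (by simpa using fun q hq => hL q (by simp [hq]))
      refine ⟨by rw [h1]; simp, fun o => ?_, fun q => ?_⟩
      · rw [h2 o, pv_getD_set]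
        by_cases ho : o = p
        · subst ho; simp [hp]
        · rw [if_neg (fun h => ho h.1.symm)]
          simp [List.mem_cons, ho]
      · rw [h3 q, pv_getD_set]
        have hs3 : s.getD p false = false := by simpa using hs
        by_cases hq : q = p
        · subst hq; rw [if_pos ⟨rfl, hp⟩]
          simp [hs2]
        · rw [if_neg (fun h => hq h.1.symm)]
          simp only [List.mem_append, List.mem_cons, hq, false_or]
          tauto


-- ---------- expansion fold of A, characterised ----------
theorem pvSetFold (L : List Nat) :
    ∀ (np : List Int) (c : Nat → Bool), (∀ p ∈ L, p < np.length) →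
      (L.foldl (fun np2 p => if c p then np2.set p 1 else np2) np).length = np.length
      ∧ ∀ o, (L.foldl (fun np2 p => if c p then np2.set p 1 else np2) np).getD o 0
              = (if o ∈ L ∧ c o then 1 else np.getD o 0) := by
  induction L with
  | nil => intro np c _; simp
  | cons p L ih =>
    intro np c hL
    have hp : p < np.length := hL p (by simp)
    rw [List.foldl_cons]
    by_cases h : c p
    · have := ih (np.set p 1) c (by simpa using fun q hq => hL q (by simp [hq]))
      rw [if_pos h]
      refine ⟨by rw [this.1]; simp, fun o => ?_⟩
      rw [this.2 o, pv_getD_set]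
      by_cases ho : o ∈ L <;> by_cases hco : c o = true <;> by_cases hop : p = o <;>
        simp_all <;> omega
    · have := ih np c (fun q hq => hL q (by simp [hq]))
      rw [if_neg h]
      refine ⟨this.1, fun o => ?_⟩
      rw [this.2 o]
      by_cases ho : o ∈ L <;> by_cases hop : o = p <;> simp_all

theorem pvExpandFold (A : List (List Int)) (r : List Int) (M : List Nat) :
    ∀ (np : List Int), np.length = A.length →
      (M.foldl
        (fun np m =>
          if r.getD m 0 == 1 then
            (List.range A.length).foldl
              (fun np2 p => if (A.getD m []).getD p 0 == 1 then np2.set p 1 else np2) np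
          else np) np).length = A.length
      ∧ ∀ o,
        (M.foldl
          (fun np m =>
            if r.getD m 0 == 1 then
              (List.range A.length).foldl
                (fun np2 p => if (A.getD m []).getD p 0 == 1 then np2.set p 1 else np2) np
            else np) np).getD o 0
        = (if (∃ m ∈ M, r.getD m 0 = 1 ∧ o < A.length ∧ (A.getD m []).getD o 0 = 1) then 1
           else np.getD o 0) := by
  induction M with
  | nil => intro np h; simp [h]
  | cons m M ih =>
    intro np hnp
    rw [List.foldl_cons]
    by_cases hm : r.getD m 0 = 1
    · rw [if_pos (by simpa using hm)]
      obtain ⟨hlen, hchar⟩ := pvSetFold (List.range A.length) np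
        (fun p => (A.getD m []).getD p 0 == 1) (fun q hq => by rw [hnp]; simpa using hq)
      obtain ⟨h1, h2⟩ := ih _ (by rw [hlen, hnp])
      refine ⟨h1, fun o => ?_⟩
      rw [h2 o, hchar o]
      by_cases hex : ∃ m' ∈ M, r.getD m' 0 = 1 ∧ o < A.length ∧ (A.getD m' []).getD o 0 = 1
      · obtain ⟨m', hm', h1', h2', h3'⟩ := hex
        rw [if_pos ⟨m', hm', h1', h2', h3'⟩,
          if_pos ⟨m', List.mem_cons_of_mem _ hm', h1', h2', h3'⟩]
      · rw [if_neg hex]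
        by_cases ho : o < A.length ∧ (A.getD m []).getD o 0 = 1
        · rw [if_pos (by simpa [List.mem_range] using ho), if_pos ⟨m, by simp, hm, ho⟩]
        · rw [if_neg (by simpa [List.mem_range] using ho), if_neg (by
            rintro ⟨m', hm', h1', h2', h3'⟩
            rcases List.mem_cons.mp hm' with h | h
            · exact ho ⟨h2', h ▸ h3'⟩
            · exact hex ⟨m', h, h1', h2', h3'⟩)]
    · rw [if_neg (by simpa using hm)]
      obtain ⟨h1, h2⟩ := ih np hnp
      refine ⟨h1, fun o => ?_⟩
      rw [h2 o]
      refine if_congr ⟨fun ⟨m', hm', hr⟩ => ⟨m', by simp [hm'], hr⟩, ?_⟩ rfl rfl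
      rintro ⟨m', hm', h1', h2'⟩
      rcases List.mem_cons.mp hm' with h | h
      · exact absurd (h ▸ h1') hm
      · exact ⟨m', h, h1', h2'⟩

theorem pvExpandChar (A : List (List Int)) (r : List Int) (hr : r.length = A.length) :
    (pvExpand A A.length r).length = A.length
    ∧ ∀ o, (pvExpand A A.length r).getD o 0
        = (if (∃ m, m < A.length ∧ r.getD m 0 = 1 ∧ o < A.length
               ∧ (A.getD m []).getD o 0 = 1) then 1 else r.getD o 0) := by
  have h := pvExpandFold A r (List.range A.length) r hr
  unfold pvExpand
  refine ⟨h.1, fun o => ?_⟩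
  rw [h.2 o]
  refine if_congr ⟨?_, ?_⟩ rfl rfl
  · rintro ⟨m, hm, h1, h2, h3⟩; exact ⟨m, List.mem_range.mp hm, h1, h2, h3⟩
  · rintro ⟨m, hm, h1, h2, h3⟩; exact ⟨m, List.mem_range.mpr hm, h1, h2, h3⟩

-- ---------- the invariant tying A's 0/1 row to B's seen/frontier ----------
def pvInv (A : List (List Int)) (r : List Int) (seen : List Bool) (frontier : List Nat) : Prop :=
  r.length = A.length ∧ seen.length = A.length ∧
  (∀ o, o < A.length → r.getD o 0 = (if seen.getD o false then 1 else 0)) ∧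
  (∀ m ∈ frontier, m < A.length ∧ seen.getD m false = true) ∧
  (∀ m, m < A.length → seen.getD m false = true → m ∉ frontier →
     ∀ p, p < A.length → (A.getD m []).getD p 0 = 1 → seen.getD p false = true)

theorem pvAdj_getD (A : List (List Int)) (m : Nat) (hm : m < A.length) :
    (pvAdj A).getD m []
      = (List.range A.length).filter (fun p => (A.getD m []).getD p 0 == 1) := by
  simp [pvAdj, List.getD_eq_getElem?_getD, List.getElem?_eq_getElem hm]

theorem pvAdjMem (A : List (List Int)) (m : Nat) (hm : m < A.length) (p : Nat) :
    p ∈ (pvAdj A).getD m [] ↔ p < A.length ∧ (A.getD m []).getD p 0 = 1 := by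
  simp [pvAdj, List.getD_eq_getElem?_getD, List.getElem?_map, List.getElem?_eq_getElem hm,
    List.mem_filter, List.mem_range]

theorem pvStepRel (A : List (List Int)) (degrees : List Int) (i : Nat) (j : Int) (hj : 1 ≤ j)
    (r : List Int) (seen : List Bool) (frontier : List Nat) (c : List (Int × Int))
    (hinv : pvInv A r seen frontier) :
    (pvStepA A A.length degrees i (r, c) j).2
      = (pvStepB A A.length degrees (seen, frontier, c) j).2.2
    ∧ pvInv A (pvStepA A A.length degrees i (r, c) j).1
        (pvStepB A A.length degrees (seen, frontier, c) j).1
        (pvStepB A A.length degrees (seen, frontier, c) j).2.1 := by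
  obtain ⟨hr, hseen, hrel, hF1, hF2⟩ := hinv
  have hj0 : (j == 0) = false := by simp; omega
  have hjpos : j > 0 := by omega
  simp only [pvStepA, pvStepB, hj0, if_pos hjpos, Bool.false_eq_true, if_false]
  set L := frontier.flatMap (fun m => (pvAdj A).getD m []) with hLdef
  have hrw : frontier.foldl
      (fun sf m =>
        (List.range A.length).foldl
          (fun sf2 p => if (A.getD m []).getD p 0 == 1 then pvMarkStep sf2 p else sf2) sf)
      (seen, ([] : List Nat))
      = (frontier.flatMap (fun m => (pvAdj A).getD m [])).foldl pvMarkStep (seen, []) := by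
    rw [List.foldl_flatMap]
    apply PySem.List.foldl_congr_mem
    intro acc m hm
    rw [PySem.List.foldl_if_eq_foldl_filter, pvAdj_getD A m (hF1 m hm).1]
  rw [hrw, ← hLdef]
  have hbound : ∀ p ∈ L, p < seen.length := by
    intro p hp
    obtain ⟨m, hmf, hpm⟩ := List.mem_flatMap.mp hp
    have hm := hF1 m hmf
    rw [hseen]
    exact ((pvAdjMem A m hm.1 p).mp hpm).1
  obtain ⟨h1, h2, h3⟩ := pvMarkFold L seen [] hbound
  have hpoint : ∀ o, o < A.length →
      (pvExpand A A.length r).getD o 0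
        = (if (seen.getD o false || decide (o ∈ L)) = true then 1 else 0) := by
    intro o ho
    rw [(pvExpandChar A r hr).2 o]
    by_cases hEA : ∃ m, m < A.length ∧ r.getD m 0 = 1 ∧ o < A.length
        ∧ (A.getD m []).getD o 0 = 1
    · rw [if_pos hEA]
      obtain ⟨m, hm1, hrm, ho2, hAmo⟩ := hEA
      have hsm : seen.getD m false = true := by
        by_cases hb : seen.getD m false = true
        · exact hb
        · exfalso
          rw [hrel m hm1, if_neg hb] at hrm
          exact absurd hrm (by norm_num)
      by_cases hmf : m ∈ frontier
      · have : o ∈ L := List.mem_flatMap.mpr ⟨m, hmf, (pvAdjMem A m hm1 o).mpr ⟨ho2, hAmo⟩⟩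
        simp [this]
      · have h := hF2 m hm1 hsm hmf o ho hAmo
        rw [h]
        simp
    · rw [if_neg hEA]
      have hoL : o ∉ L := by
        intro hoL
        apply hEA
        obtain ⟨m, hmf, hpm⟩ := List.mem_flatMap.mp hoL
        have hm := hF1 m hmf
        obtain ⟨ho2, hA⟩ := (pvAdjMem A m hm.1 o).mp hpm
        refine ⟨m, hm.1, ?_, ho2, hA⟩
        rw [hrel m hm.1, hm.2]
        simp
      rw [hrel o ho]
      simp [hoL]
  have hseen2 : ∀ o, (List.foldl pvMarkStep (seen, []) L).1.getD o false
      = (seen.getD o false || decide (o ∈ L)) := h2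
  constructor
  · -- the emitted colour lists coincide
    have hcond : ∀ o ∈ List.range A.length,
        ((pvExpand A A.length r).getD o 0 == 1)
          = (List.foldl pvMarkStep (seen, []) L).1.getD o false := by
      intro o ho
      rw [hpoint o (List.mem_range.mp ho), hseen2 o]
      cases (seen.getD o false || decide (o ∈ L)) <;> simp
    rw [PySem.List.foldl_append_if, List.filter_congr hcond]
  · refine ⟨(pvExpandChar A r hr).1, by rw [h1, hseen], ?_, ?_, ?_⟩
    · intro o ho
      rw [hpoint o ho, hseen2 o]
    · intro m hm
      have := (h3 m).mp hm
      simp only [List.not_mem_nil, false_or] at this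
      refine ⟨by have := hbound m this.1; omega, ?_⟩
      rw [hseen2 m]
      simp [this.1]
    · intro m hm hsm' hmfr' p hp hApm
      by_cases hsm : seen.getD m false = true
      · by_cases hmf : m ∈ frontier
        · have hpL : p ∈ L :=
            List.mem_flatMap.mpr ⟨m, hmf, (pvAdjMem A m hm p).mpr ⟨hp, hApm⟩⟩
          rw [hseen2 p]; simp [hpL]
        · have h := hF2 m hm hsm hmf p hp hApm
          rw [hseen2 p, h]
          simp
      · exfalso
        apply hmfr'
        have hmL : m ∈ L := by
          have h := (hseen2 m).symm.trans hsm'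
          have hsmf : seen.getD m false = false := by simpa using hsm
          rw [hsmf] at h
          simpa using h
        exact (h3 m).mpr (Or.inr ⟨hmL, by simpa using hsm⟩)

theorem pvFoldRel (A : List (List Int)) (degrees : List Int) (i : Nat) (js : List Int)
    (hjs : ∀ j ∈ js, 1 ≤ j) :
    ∀ (r : List Int) (seen : List Bool) (frontier : List Nat) (c : List (Int × Int)),
      pvInv A r seen frontier →
      (js.foldl (pvStepA A A.length degrees i) (r, c)).2
        = (js.foldl (pvStepB A A.length degrees) (seen, frontier, c)).2.2 := by
  induction js with
  | nil => intro r seen frontier c _; rfl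
  | cons j js ih =>
    intro r seen frontier c hinv
    have hj : 1 ≤ j := hjs j (by simp)
    obtain ⟨hc, hinv'⟩ := pvStepRel A degrees i j hj r seen frontier c hinv
    rw [List.foldl_cons, List.foldl_cons,
      show pvStepB A A.length degrees (seen, frontier, c) j
          = ((pvStepB A A.length degrees (seen, frontier, c) j).1,
             (pvStepB A A.length degrees (seen, frontier, c) j).2.1,
             (pvStepA A A.length degrees i (r, c) j).2) from by rw [hc],
      show pvStepA A A.length degrees i (r, c) j
          = ((pvStepA A A.length degrees i (r, c) j).1,
             (pvStepA A A.length degrees i (r, c) j).2) from rfl]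
    exact ih (fun j' hj' => hjs j' (by simp [hj'])) _ _ _ _ hinv'

theorem pvRow_eq (A : List (List Int)) (k : Int) (i : Nat) (hi : i < A.length) :
    pvRowA A k i = pvRowB A k i := by
  unfold pvRowA pvRowB
  rw [pv_degrees_eq]
  by_cases hk : k + 1 ≤ 0
  · rw [PySem.List.pyRange_one_eq_nil hk]
    rfl
  · have h0 : (0 : Int) < k + 1 := by omega
    rw [PySem.List.pyRange_one_cons h0, List.foldl_cons, List.foldl_cons]
    -- the two j = 0 head steps
    have hstepA : pvStepA A A.length (A.map (fun row => row.sum)) i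
        (List.replicate A.length 0, []) (0 : Int)
        = ((List.replicate A.length (0 : Int)).set i 1,
           ((List.range A.length).filter
             (fun o => ((List.replicate A.length (0 : Int)).set i 1).getD o 0 == 1)).map
             (fun o => ((0 : Int), (A.map (fun row => row.sum)).getD o 0))) := by
      simp [pvStepA]
    have hstepB : pvStepB A A.length (A.map (fun row => row.sum))
        ((List.replicate A.length false).set i true, [i], []) (0 : Int)
        = ((List.replicate A.length false).set i true, [i],
           ((List.range A.length).filter
             (fun o => ((List.replicate A.length false).set i true).getD o false)).map
             (fun o => ((0 : Int), (A.map (fun row => row.sum)).getD o 0))) := by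
      simp [pvStepB, PySem.List.foldl_append_if]
    rw [hstepA, hstepB]
    have hrel0 : ∀ o, o < A.length →
        ((List.replicate A.length (0 : Int)).set i 1).getD o 0
          = (if ((List.replicate A.length false).set i true).getD o false = true
             then 1 else 0) := by
      intro o ho
      rw [pv_getD_set, pv_getD_set]
      by_cases hio : i = o
      · subst hio; simp [hi]
      · rw [if_neg (fun h => hio h.1), if_neg (by simp [hio]), pv_getD_replicate]
        simp
    have hcond0 : ∀ o ∈ List.range A.length,
        (((List.replicate A.length (0 : Int)).set i 1).getD o 0 == 1)
          = ((List.replicate A.length false).set i true).getD o false := by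
      intro o ho
      rw [hrel0 o (List.mem_range.mp ho)]
      cases ((List.replicate A.length false).set i true).getD o false <;> simp
    rw [List.filter_congr hcond0]
    apply pvFoldRel A (A.map (fun row => row.sum)) i (PySem.List.pyRange 1 (k+1) 1)
      (fun j hj => (PySem.List.mem_pyRange_one.mp hj).1)
    -- the invariant after the j = 0 step
    refine ⟨by simp, by simp, hrel0, ?_, ?_⟩
    · intro m hm
      rw [List.mem_singleton] at hm
      subst hm
      refine ⟨hi, ?_⟩
      rw [pv_getD_set, if_pos ⟨rfl, by simpa using hi⟩]
    · intro m hm hsm hmf p hp hApm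
      exfalso
      apply hmf
      rw [List.mem_singleton]
      by_contra hne
      rw [pv_getD_set, if_neg (fun h => hne h.1.symm), pv_getD_replicate, if_pos hm] at hsm
      exact Bool.false_ne_true hsm

-- ===== VERDICT (by name: the statement is the Claim_ definition above) =====
theorem color_k_neigh_spec : Claim_equal_color_k_neigh := by
  intro A k _ _
  unfold Spec_color_k_neigh
  rw [pvDecompA, pvDecompB]
  exact List.map_congr_left (fun i hi => by rw [pvRow_eq A k i (List.mem_range.mp hi)])
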